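-- pv_equiv track=rewrite | github.com/debobrad579/Graphing-Calculator | Calculator.py | get_final_operation_index
-- ===== SOURCE A (Python) =====
-- def get_final_operation_index(string: str, use_bracket=True):
--     signs = ["+", "/", "*", "-", "%", "^", "=", "("]
--     final_sign_index = 0
--
--     if not use_bracket:
--         signs.remove("(")
--
--     for index, character in enumerate(string):
--         if (
--             character in signs
--             and index > final_sign_index
--             and (character != "-" or string[index - 1] != "(")
--             and (character != "(" or index != len(string) - 1)
--             and (not use_bracket or string[index - 1] not in signs or character != "-")
--         ):
--             final_sign_index = index
--
--     return final_sign_index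
-- ===== SOURCE B (Python) =====
-- def get_final_operation_index(string: str, use_bracket=True):
--     signs = "+/*-%^=(" if use_bracket else "+/*-%^="
--     n = len(string)
--     for index in range(n - 1, 0, -1):
--         c = string[index]
--         if c not in signs:
--             continue
--         if c == "-" and string[index - 1] == "(":
--             continue
--         if c == "(" and index == n - 1:
--             continue
--         if use_bracket and string[index - 1] in signs and c == "-":
--             continue
--         return index
--     return 0
-- ===== Notes on version B (the rewrite author's own statement) =====
-- stated objective: simpler
-- what changed: Replaces the forward enumerate loop that keeps a running final_sign_index by a backward scan from the end that returns the first (i.e. last) valid operator index immediately, with the guards as flat continue-clauses.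
import Mathlib
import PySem

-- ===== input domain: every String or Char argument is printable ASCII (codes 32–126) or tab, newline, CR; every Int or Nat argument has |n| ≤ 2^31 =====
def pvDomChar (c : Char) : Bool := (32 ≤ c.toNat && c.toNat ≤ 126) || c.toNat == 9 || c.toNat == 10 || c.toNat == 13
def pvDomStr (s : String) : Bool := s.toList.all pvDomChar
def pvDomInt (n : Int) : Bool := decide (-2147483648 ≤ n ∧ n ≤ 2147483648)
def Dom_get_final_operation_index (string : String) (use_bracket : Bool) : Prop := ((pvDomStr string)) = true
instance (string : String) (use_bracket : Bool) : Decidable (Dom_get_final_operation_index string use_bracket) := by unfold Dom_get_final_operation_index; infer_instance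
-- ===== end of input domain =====

-- B replaces A's forward loop with a running maximum by a backward scan returning the first
-- (= last) valid operator index immediately; same return value, simpler control flow.

-- ===== PORT A =====
-- signs after the optional signs.remove("(")
def pvSigns (use_bracket : Bool) : List Char :=
  if use_bracket then ['+', '/', '*', '-', '%', '^', '=', '(']
  else ['+', '/', '*', '-', '%', '^', '=']

-- forward enumerate loop keeping the running final_sign_index
def get_final_operation_index (string : String) (use_bracket : Bool) : Int :=
  let signs := pvSigns use_bracket
  let cs := string.toList
  (PySem.List.enumerate cs 0).foldl (fun fsi p =>
    if p.2 ∈ signs ∧ p.1 > fsi ∧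
       (p.2 ≠ '-' ∨ PySem.List.pyGetD cs (p.1 - 1) ' ' ≠ '(') ∧
       (p.2 ≠ '(' ∨ p.1 ≠ (cs.length : Int) - 1) ∧
       (use_bracket = false ∨ PySem.List.pyGetD cs (p.1 - 1) ' ' ∉ signs ∨ p.2 ≠ '-')
    then p.1 else fsi) 0

-- ===== PORT B =====
-- backward scan: index runs n-1, n-2, …, 1; the first index passing all four continue-guards is returned
def pvAltLoop (cs signs : List Char) (ub : Bool) : Nat → Int
  | 0 => 0
  | i + 1 =>
    let c := cs.getD (i + 1) ' '
    if c ∈ signs ∧ ¬(c = '-' ∧ cs.getD i ' ' = '(') ∧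
       ¬(c = '(' ∧ i + 1 = cs.length - 1) ∧
       ¬(ub = true ∧ cs.getD i ' ' ∈ signs ∧ c = '-')
    then ((i : Int) + 1) else pvAltLoop cs signs ub i

def get_final_operation_index_alt (string : String) (use_bracket : Bool) : Int :=
  let cs := string.toList
  pvAltLoop cs (pvSigns use_bracket) use_bracket (cs.length - 1)

-- ===== PRECONDITION & SPEC =====
def Spec_get_final_operation_index (string : String) (use_bracket : Bool) (out : Int) : Prop := out = get_final_operation_index_alt string use_bracket
instance (string : String) (use_bracket : Bool) (out : Int) : Decidable (Spec_get_final_operation_index string use_bracket out) := by unfold Spec_get_final_operation_index; infer_instance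

-- ===== CLAIM (what is proved, stated in full; the proofs are below) =====
def Claim_equal_get_final_operation_index : Prop := ∀ (string : String) (use_bracket : Bool), Dom_get_final_operation_index string use_bracket → Spec_get_final_operation_index string use_bracket (get_final_operation_index string use_bracket)

-- ===== LEMMAS AND PROOFS =====

-- the value of A's forward fold over the first n indices
def pvAfold (cs signs : List Char) (ub : Bool) (n : Nat) : Int :=
  (PySem.List.pyRange 0 (n : Int) 1).foldl (fun fsi j =>
    if PySem.List.pyGetD cs j ' ' ∈ signs ∧ j > fsi ∧
       (PySem.List.pyGetD cs j ' ' ≠ '-' ∨ PySem.List.pyGetD cs (j - 1) ' ' ≠ '(') ∧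
       (PySem.List.pyGetD cs j ' ' ≠ '(' ∨ j ≠ (cs.length : Int) - 1) ∧
       (ub = false ∨ PySem.List.pyGetD cs (j - 1) ' ' ∉ signs ∨ PySem.List.pyGetD cs j ' ' ≠ '-')
    then j else fsi) 0

-- the forward fold equals the backward scan from n-1, and its value lies in [0, max n 1)
theorem pvLoop_eq (cs signs : List Char) (ub : Bool) (n : Nat) (hn : n ≤ cs.length) :
    pvAfold cs signs ub n = pvAltLoop cs signs ub (n - 1)
    ∧ 0 ≤ pvAfold cs signs ub n ∧ pvAfold cs signs ub n < max (n : Int) 1 := by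
  induction n with
  | zero =>
    simp [pvAfold, PySem.List.pyRange_one_eq_nil, pvAltLoop]
  | succ m ih =>
    have hm : m ≤ cs.length := Nat.le_of_succ_le hn
    obtain ⟨ih1, ih2, ih3⟩ := ih hm
    have hsplit : PySem.List.pyRange 0 ((m + 1 : Nat) : Int) 1
        = PySem.List.pyRange 0 (m : Int) 1 ++ [(m : Int)] := by
      push_cast
      exact PySem.List.pyRange_one_succ_right (by positivity)
    have hstep : pvAfold cs signs ub (m + 1) =
        (if PySem.List.pyGetD cs (m : Int) ' ' ∈ signs ∧ (m : Int) > pvAfold cs signs ub m ∧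
           (PySem.List.pyGetD cs (m : Int) ' ' ≠ '-' ∨ PySem.List.pyGetD cs ((m : Int) - 1) ' ' ≠ '(') ∧
           (PySem.List.pyGetD cs (m : Int) ' ' ≠ '(' ∨ (m : Int) ≠ (cs.length : Int) - 1) ∧
           (ub = false ∨ PySem.List.pyGetD cs ((m : Int) - 1) ' ' ∉ signs ∨ PySem.List.pyGetD cs (m : Int) ' ' ≠ '-')
         then (m : Int) else pvAfold cs signs ub m) := by
      unfold pvAfold
      rw [hsplit, List.foldl_append]
      simp only [List.foldl_cons, List.foldl_nil]
    rw [hstep]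
    cases m with
    | zero =>
      rw [ih1]
      simp [pvAltLoop]
    | succ i =>
      simp only [Nat.add_sub_cancel] at ih1 ⊢
      have hgt : ((i + 1 : Nat) : Int) > pvAltLoop cs signs ub i := by
        rw [← ih1]
        push_cast at ih3 ⊢
        omega
      have hnn : (0 : Int) ≤ pvAltLoop cs signs ub i := by rw [← ih1]; exact ih2
      have hbound : pvAltLoop cs signs ub i < max ((i + 1 + 1 : Nat) : Int) 1 := by
        rw [← ih1]
        push_cast at ih3 ⊢
        omega
      rw [ih1]
      have hc : PySem.List.pyGetD cs ((i + 1 : Nat) : Int) ' ' = cs.getD (i + 1) ' ' :=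
        PySem.List.pyGetD_natCast ..
      have hp : PySem.List.pyGetD cs (((i + 1 : Nat) : Int) - 1) ' ' = cs.getD i ' ' := by
        have h : (((i + 1 : Nat) : Int) - 1) = ((i : Nat) : Int) := by push_cast; ring
        rw [h]
        exact PySem.List.pyGetD_natCast ..
      have hlen : (((i + 1 : Nat) : Int) ≠ (cs.length : Int) - 1) ↔ ¬ (i + 1 = cs.length - 1) := by
        have h2 : i + 2 ≤ cs.length := hn
        omega
      clear hstep hsplit ih ih1 ih2 ih3 hn hm
      rw [hc, hp]
      have hval : ((i + 1 : Nat) : Int) = (i : Int) + 1 := by push_cast; ring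
      have hbool : (ub = false) ↔ ¬ (ub = true) := by simp
      have hiff : (cs.getD (i + 1) ' ' ∈ signs ∧ ((i + 1 : Nat) : Int) > pvAltLoop cs signs ub i ∧
            (cs.getD (i + 1) ' ' ≠ '-' ∨ cs.getD i ' ' ≠ '(') ∧
            (cs.getD (i + 1) ' ' ≠ '(' ∨ ((i + 1 : Nat) : Int) ≠ (cs.length : Int) - 1) ∧
            (ub = false ∨ cs.getD i ' ' ∉ signs ∨ cs.getD (i + 1) ' ' ≠ '-'))
          ↔ (cs.getD (i + 1) ' ' ∈ signs ∧ ¬(cs.getD (i + 1) ' ' = '-' ∧ cs.getD i ' ' = '(') ∧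
            ¬(cs.getD (i + 1) ' ' = '(' ∧ i + 1 = cs.length - 1) ∧
            ¬(ub = true ∧ cs.getD i ' ' ∈ signs ∧ cs.getD (i + 1) ' ' = '-')) := by
        rw [hlen, hbool]
        constructor
        · rintro ⟨a, _, c, d, e⟩
          exact ⟨a, by tauto, by tauto, by tauto⟩
        · rintro ⟨a, c, d, e⟩
          exact ⟨a, hgt, by tauto, by tauto, by tauto⟩
      have hunf : pvAltLoop cs signs ub (i + 1)
          = if cs.getD (i + 1) ' ' ∈ signs ∧ ¬(cs.getD (i + 1) ' ' = '-' ∧ cs.getD i ' ' = '(') ∧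
               ¬(cs.getD (i + 1) ' ' = '(' ∧ i + 1 = cs.length - 1) ∧
               ¬(ub = true ∧ cs.getD i ' ' ∈ signs ∧ cs.getD (i + 1) ' ' = '-')
            then ((i : Int) + 1) else pvAltLoop cs signs ub i := by
        rw [pvAltLoop]
      refine ⟨?_, ?_⟩
      · rw [hunf]
        exact if_congr hiff hval rfl
      · split_ifs with hCA
        · exact ⟨by positivity, by push_cast; omega⟩
        · exact ⟨hnn, hbound⟩

-- ===== VERDICT (by name: the statement is the Claim_ definition above) =====
theorem get_final_operation_index_spec : Claim_equal_get_final_operation_index := by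
  intro string use_bracket _
  unfold Spec_get_final_operation_index get_final_operation_index get_final_operation_index_alt
  show (PySem.List.enumerate string.toList 0).foldl (fun fsi p =>
      if p.2 ∈ pvSigns use_bracket ∧ p.1 > fsi ∧
         (p.2 ≠ '-' ∨ PySem.List.pyGetD string.toList (p.1 - 1) ' ' ≠ '(') ∧
         (p.2 ≠ '(' ∨ p.1 ≠ (string.toList.length : Int) - 1) ∧
         (use_bracket = false ∨ PySem.List.pyGetD string.toList (p.1 - 1) ' ' ∉ pvSigns use_bracket ∨ p.2 ≠ '-')
      then p.1 else fsi) 0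
    = pvAltLoop string.toList (pvSigns use_bracket) use_bracket (string.toList.length - 1)
  rw [PySem.List.enumerate_eq_map_pyRange (d := ' '), List.foldl_map]
  have key := (pvLoop_eq string.toList (pvSigns use_bracket) use_bracket string.toList.length le_rfl).1
  unfold pvAfold at key
  simpa using key
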